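-- pv_equiv track=rewrite | github.com/Anyside111/ECS-260-Data-Analysis | add_issue_tag/data_preprocessing_noDownturns.py | get_date_range_from_json
-- ===== SOURCE A (Python) =====
-- def get_date_range_from_json(json_data):
--     all_dates = []
--     for stats in ['monthly_issue_stats', 'monthly_pr_stats',  'monthly_pr_comments']:
--         if stats in json_data:
--             all_dates.extend(json_data[stats].keys())
--     if all_dates:
--         all_dates.sort()
--         return all_dates[0], all_dates[-1]
--     return None, None
-- ===== SOURCE B (Python) =====
-- def get_date_range_from_json(json_data):
--     all_dates = []
--     for stats in ['monthly_issue_stats', 'monthly_pr_stats', 'monthly_pr_comments']: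
--         if stats in json_data:
--             all_dates.extend(json_data[stats].keys())
--     if all_dates:
--         return min(all_dates), max(all_dates)
--     return None, None
-- ===== Notes on version B (the rewrite author's own statement) =====
-- stated objective: idiomatic
-- what changed: B replaces A's full sort of the collected date keys followed by taking the first and last element with two direct min()/max() scans, dropping the sort and the in-place mutation of the collected list.
import Mathlib
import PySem

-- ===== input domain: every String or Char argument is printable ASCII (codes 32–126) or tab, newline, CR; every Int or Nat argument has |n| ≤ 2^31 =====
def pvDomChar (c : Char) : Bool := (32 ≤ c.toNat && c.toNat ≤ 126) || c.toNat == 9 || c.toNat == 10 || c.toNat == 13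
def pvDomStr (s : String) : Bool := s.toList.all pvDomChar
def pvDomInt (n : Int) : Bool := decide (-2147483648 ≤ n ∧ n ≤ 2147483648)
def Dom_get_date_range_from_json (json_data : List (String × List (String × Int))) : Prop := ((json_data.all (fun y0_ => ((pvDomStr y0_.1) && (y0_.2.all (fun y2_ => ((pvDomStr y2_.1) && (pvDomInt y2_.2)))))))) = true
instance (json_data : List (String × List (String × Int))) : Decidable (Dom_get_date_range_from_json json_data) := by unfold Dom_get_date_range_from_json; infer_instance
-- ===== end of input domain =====

-- B replaces A's sort-then-index [0]/[-1] with two linear min/max scans (idiomatic; same values).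
-- Shared helper: both Pythons collect the date keys with the identical guarded-extend loop.
def pvCollectDates (json_data : List (String × List (String × Int))) : List String :=
  let d := PySem.Dict.ofList json_data
  (["monthly_issue_stats", "monthly_pr_stats", "monthly_pr_comments"] : List String).foldl
    (fun acc stats =>
      if d.contains stats then acc ++ (PySem.Dict.ofList (d.getD stats [])).keys else acc) []

-- ===== PORT A =====
def get_date_range_from_json (json_data : List (String × List (String × Int))) : Option String × Option String :=
  let all_dates := pvCollectDates json_data
  if all_dates ≠ [] then
    let s := PySem.List.sorted all_dates (fun x => x) false
    (PySem.List.pyGet? s 0, PySem.List.pyGet? s (-1))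
  else (none, none)

-- ===== PORT B =====
def get_date_range_from_json_alt (json_data : List (String × List (String × Int))) : Option String × Option String :=
  let all_dates := pvCollectDates json_data
  if all_dates.isEmpty then (none, none)
  else (PySem.List.min? all_dates (fun x => x), PySem.List.max? all_dates (fun x => x))

-- ===== PRECONDITION & SPEC =====
def Spec_get_date_range_from_json (json_data : List (String × List (String × Int))) (out : Option String × Option String) : Prop := out = get_date_range_from_json_alt json_data
instance (json_data : List (String × List (String × Int))) (out : Option String × Option String) : Decidable (Spec_get_date_range_from_json json_data out) := by unfold Spec_get_date_range_from_json; infer_instance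

-- ===== CLAIM (what is proved, stated in full; the proofs are below) =====
def Claim_equal_get_date_range_from_json : Prop := ∀ (json_data : List (String × List (String × Int))), Dom_get_date_range_from_json json_data → Spec_get_date_range_from_json json_data (get_date_range_from_json json_data)

-- ===== LEMMAS AND PROOFS =====

-- ===== VERDICT (by name: the statement is the Claim_ definition above) =====
-- sorted(l)[0] is min(l): both are ≤ every element and members of l, hence equal.
lemma head_sorted_eq_min (l : List String) (h : l ≠ []) :
    PySem.List.pyGet? (PySem.List.sorted l (fun x => x) false) 0 =
    PySem.List.min? l (fun x => x) := by
  obtain ⟨m, hm⟩ : ∃ m, PySem.List.min? l (fun x => x) = some m := by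
    cases hmin : PySem.List.min? l (fun x => x) with
    | none => exact absurd ((PySem.List.min?_eq_none_iff l _).mp hmin) h
    | some m => exact ⟨m, rfl⟩
  obtain ⟨hd, tl, hs⟩ : ∃ hd tl, PySem.List.sorted l (fun x => x) false = hd :: tl := by
    cases hsort : PySem.List.sorted l (fun x => x) false with
    | nil => exact absurd ((PySem.List.sorted_eq_nil_iff l _ false).mp hsort) h
    | cons hd tl => exact ⟨hd, tl, rfl⟩
  rw [hs, hm, PySem.List.pyGet?_zero_cons]
  have hdm : hd ∈ l := (PySem.List.mem_sorted l _ false hd).mp (hs ▸ List.mem_cons_self)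
  have h1 : hd ≤ m := PySem.List.key_head_sorted_le l (fun x => x) hs m (PySem.List.min?_mem hm)
  have h2 : m ≤ hd := PySem.List.min?_isMin hm hd hdm
  exact congrArg some (le_antisymm h1 h2)

-- sorted(l)[-1] is max(l): both are ≥ every element and members of l, hence equal.
lemma last_sorted_eq_max (l : List String) (h : l ≠ []) :
    PySem.List.pyGet? (PySem.List.sorted l (fun x => x) false) (-1) =
    PySem.List.max? l (fun x => x) := by
  obtain ⟨m, hm⟩ : ∃ m, PySem.List.max? l (fun x => x) = some m := by
    cases hmax : PySem.List.max? l (fun x => x) with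
    | none => exact absurd ((PySem.List.max?_eq_none_iff l _).mp hmax) h
    | some m => exact ⟨m, rfl⟩
  have hsne : PySem.List.sorted l (fun x => x) false ≠ [] := by
    intro hnil; exact h ((PySem.List.sorted_eq_nil_iff l _ false).mp hnil)
  have hlen : 0 < (PySem.List.sorted l (fun x => x) false).length :=
    List.length_pos_iff.mpr hsne
  rw [PySem.List.pyGet?_neg_one, hm, List.getLast?_eq_getElem?,
      List.getElem?_eq_getElem (by omega)]
  refine congrArg some ?_
  have hmem : (PySem.List.sorted l (fun x => x) false)[(PySem.List.sorted l (fun x => x) false).length - 1] ∈ l :=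
    (PySem.List.mem_sorted l _ false _).mp (List.getElem_mem _)
  have h1 : (PySem.List.sorted l (fun x => x) false)[(PySem.List.sorted l (fun x => x) false).length - 1] ≤ m :=
    PySem.List.max?_isMax hm _ hmem
  obtain ⟨i, hi, hgi⟩ := List.mem_iff_getElem.mp ((PySem.List.mem_sorted l (fun x => x) false m).mpr (PySem.List.max?_mem hm))
  have h2 : m ≤ (PySem.List.sorted l (fun x => x) false)[(PySem.List.sorted l (fun x => x) false).length - 1] := by
    have := PySem.List.key_sorted_getElem_mono l (fun x => x)
      (p := i) (q := (PySem.List.sorted l (fun x => x) false).length - 1)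
      (by omega) (by omega)
    simpa [hgi] using this
  exact le_antisymm h1 h2

lemma range_eq_of_list (l : List String) :
    (if l ≠ [] then
      (PySem.List.pyGet? (PySem.List.sorted l (fun x => x) false) 0,
       PySem.List.pyGet? (PySem.List.sorted l (fun x => x) false) (-1))
     else (none, none)) =
    (if l.isEmpty then ((none : Option String), (none : Option String))
     else (PySem.List.min? l (fun x => x), PySem.List.max? l (fun x => x))) := by
  by_cases h : l = []
  · simp [h]
  · simp [h, List.isEmpty_iff, head_sorted_eq_min l h, last_sorted_eq_max l h]

theorem get_date_range_from_json_spec : Claim_equal_get_date_range_from_json := by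
  intro json_data _
  unfold Spec_get_date_range_from_json get_date_range_from_json get_date_range_from_json_alt
  exact range_eq_of_list (pvCollectDates json_data)
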